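-- pv_equiv track=rewrite | github.com/James-Masterson/comp110-22f-workspace | sandbox/gay.py | reverse_multiply
-- ===== SOURCE A (Python) =====
-- def reverse_multiply(list_one: list[int]) -> list:
--     result: list[int] = []
--     i: int = len(list_one) - 1
--     while i >= 0:
--         list_one[i] *= 2
--         result.append(list_one[i])
--         i -= 1
--     return result
-- ===== SOURCE B (Python) =====
-- def reverse_multiply(list_one: list[int]) -> list:
--     for i in range(len(list_one)):
--         list_one[i] *= 2
--     return list_one[::-1]
-- ===== Notes on version B (the rewrite author's own statement) =====
-- stated objective: idiomatic
-- what changed: Replaces A's single backward index loop that interleaves doubling and appending with a forward in-place doubling pass followed by a slice reversal (list_one[::-1]); return value and the mutation of list_one match A exactly.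
import Mathlib
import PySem

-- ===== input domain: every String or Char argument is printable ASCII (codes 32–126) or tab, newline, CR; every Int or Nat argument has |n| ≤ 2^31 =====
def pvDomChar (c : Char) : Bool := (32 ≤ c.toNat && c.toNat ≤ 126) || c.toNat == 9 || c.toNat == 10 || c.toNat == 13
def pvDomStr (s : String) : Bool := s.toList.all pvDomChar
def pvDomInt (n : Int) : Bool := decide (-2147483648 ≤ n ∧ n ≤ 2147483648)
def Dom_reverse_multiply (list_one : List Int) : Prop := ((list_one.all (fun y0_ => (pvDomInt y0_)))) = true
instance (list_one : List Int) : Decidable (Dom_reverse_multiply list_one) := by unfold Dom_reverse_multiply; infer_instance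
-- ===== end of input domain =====

-- B: forward doubling pass then a slice reversal instead of A's backward interleaved loop (same mutation of list_one in Python; equivalence proved about the return value).
-- ===== PORT A =====
-- while i >= 0: list_one[i] *= 2; result.append(list_one[i]); i -= 1  — recursion on k = i+1
def rmA_loop (list_one : List Int) (result : List Int) : Nat → List Int
  | 0 => result
  | Nat.succ k => rmA_loop list_one (result ++ [2 * PySem.List.pyGetD list_one (Int.ofNat k) 0]) k

def reverse_multiply (list_one : List Int) : List Int :=
  rmA_loop list_one [] list_one.length

-- ===== PORT B =====
-- for i in range(len): list_one[i] *= 2  (in-place pass = map over the list), then list_one[::-1]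
def reverse_multiply_alt (list_one : List Int) : List Int :=
  (PySem.List.slice? (list_one.map (fun x => 2 * x)) none none (-1)).getD []

-- ===== PRECONDITION & SPEC =====
def Spec_reverse_multiply (list_one : List Int) (out : List Int) : Prop := out = reverse_multiply_alt list_one
instance (list_one : List Int) (out : List Int) : Decidable (Spec_reverse_multiply list_one out) := by unfold Spec_reverse_multiply; infer_instance

-- ===== CLAIM (what is proved, stated in full; the proofs are below) =====
def Claim_equal_reverse_multiply : Prop := ∀ (list_one : List Int), Dom_reverse_multiply list_one → Spec_reverse_multiply list_one (reverse_multiply list_one)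

-- ===== LEMMAS AND PROOFS =====

-- ===== VERDICT (by name: the statement is the Claim_ definition above) =====
theorem rmA_loop_eq (list_one : List Int) :
    ∀ (k : Nat) (result : List Int), k ≤ list_one.length →
      rmA_loop list_one result k = result ++ ((list_one.take k).map (fun x => 2 * x)).reverse := by
  intro k
  induction k with
  | zero => intro result _; simp [rmA_loop]
  | succ k ih =>
    intro result hk
    have hk' : k < list_one.length := by omega
    rw [rmA_loop, ih _ (by omega)]
    have h2 : k < (list_one.map (fun x => 2 * x)).length := by simpa using hk'
    simp [PySem.List.pyGetD_natCast, List.getD, hk', List.take_succ_eq_append_getElem h2]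

theorem reverse_multiply_spec : Claim_equal_reverse_multiply := by
  intro l _
  unfold Spec_reverse_multiply reverse_multiply reverse_multiply_alt
  rw [rmA_loop_eq l l.length [] (le_refl _)]
  simp [PySem.List.slice?_none_none_neg_one]
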